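-- pv_equiv track=rewrite | github.com/qoocrab/project-algorithm-programmers | level_0/KCH/20230905/길이에따른연산.py | solution
-- ===== SOURCE A (Python) =====
-- def solution(num_list):
--     accm_sum = 0
--     accm_mul = 1
--     for i in range(len(num_list)):
--         accm_sum += num_list[i]
--         if i<10:
--             accm_mul *= num_list[i]
--
--     return accm_sum if len(num_list)>10 else accm_mul
-- ===== SOURCE B (Python) =====
-- def _dsum(xs, lo, hi):
--     # divide-and-conquer sum of xs[lo:hi]
--     if hi - lo == 0:
--         return 0
--     if hi - lo == 1:
--         return xs[lo]
--     mid = (lo + hi) // 2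
--     return _dsum(xs, lo, mid) + _dsum(xs, mid, hi)
--
-- def _dprod(xs, lo, hi):
--     # divide-and-conquer product of xs[lo:hi]
--     if hi - lo == 0:
--         return 1
--     if hi - lo == 1:
--         return xs[lo]
--     mid = (lo + hi) // 2
--     return _dprod(xs, lo, mid) * _dprod(xs, mid, hi)
--
-- def solution(num_list):
--     n = len(num_list)
--     if n > 10:
--         return _dsum(num_list, 0, n)
--     return _dprod(num_list, 0, n)
-- ===== Notes on version B (the rewrite author's own statement) =====
-- stated objective: alternative
-- what changed: B branches on the length first and then computes the single needed aggregate by divide-and-conquer over index ranges (recursively splitting [lo,hi) at the midpoint for sum, or for product when at most ten elements exist), replacing A's fused linear index loop that always maintains both accumulators.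
import Mathlib
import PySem

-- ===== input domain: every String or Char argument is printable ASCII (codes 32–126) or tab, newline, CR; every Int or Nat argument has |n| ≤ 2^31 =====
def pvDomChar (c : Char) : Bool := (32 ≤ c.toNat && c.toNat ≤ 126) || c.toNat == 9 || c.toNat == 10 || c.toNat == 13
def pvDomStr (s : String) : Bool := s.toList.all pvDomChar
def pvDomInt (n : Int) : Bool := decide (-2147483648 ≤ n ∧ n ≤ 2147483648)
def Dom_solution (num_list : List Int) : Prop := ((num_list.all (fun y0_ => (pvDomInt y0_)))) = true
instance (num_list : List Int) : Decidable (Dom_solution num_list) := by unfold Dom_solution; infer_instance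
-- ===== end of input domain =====

-- B branches on the length first and computes the single needed aggregate by divide-and-conquer over index ranges, instead of A's fused linear index loop maintaining both accumulators; objective: alternative decomposition.
-- ===== PORT A =====
def solution (num_list : List Int) : Int :=
  let st := (PySem.List.pyRange 0 (PySem.List.len num_list) 1).foldl
    (fun (acc : Int × Int) i =>
      (acc.1 + PySem.List.pyGetD num_list i 0,
       if i < 10 then acc.2 * PySem.List.pyGetD num_list i 0 else acc.2))
    (0, 1)
  if PySem.List.len num_list > 10 then st.1 else st.2

-- ===== PORT B =====
-- divide-and-conquer sum of xs[lo:hi]; the fuel argument (≥ hi - lo at every call) only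
-- makes the halving recursion structural — it never changes the computed value
def dsumB (xs : List Int) : Nat → Nat → Nat → Int
  | 0, _, _ => 0
  | fuel + 1, lo, hi =>
    if hi - lo = 0 then 0
    else if hi - lo = 1 then PySem.List.pyGetD xs (lo : Int) 0
    else dsumB xs fuel lo ((lo + hi) / 2) + dsumB xs fuel ((lo + hi) / 2) hi

-- divide-and-conquer product of xs[lo:hi], same fuel discipline
def dprodB (xs : List Int) : Nat → Nat → Nat → Int
  | 0, _, _ => 1
  | fuel + 1, lo, hi =>
    if hi - lo = 0 then 1
    else if hi - lo = 1 then PySem.List.pyGetD xs (lo : Int) 0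
    else dprodB xs fuel lo ((lo + hi) / 2) * dprodB xs fuel ((lo + hi) / 2) hi

def solution_alt (num_list : List Int) : Int :=
  if PySem.List.len num_list > 10 then dsumB num_list num_list.length 0 num_list.length
  else dprodB num_list num_list.length 0 num_list.length

-- ===== PRECONDITION & SPEC =====
def Spec_solution (num_list : List Int) (out : Int) : Prop := out = solution_alt num_list
instance (num_list : List Int) (out : Int) : Decidable (Spec_solution num_list out) := by unfold Spec_solution; infer_instance

-- ===== CLAIM (what is proved, stated in full; the proofs are below) =====
def Claim_equal_solution : Prop := ∀ (num_list : List Int), Dom_solution num_list → Spec_solution num_list (solution num_list)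

-- ===== LEMMAS AND PROOFS =====
theorem dsumB_eq (xs : List Int) (fuel lo hi : Nat) (h : hi - lo ≤ fuel) :
    dsumB xs fuel lo hi = ((List.range' lo (hi - lo)).map (fun (i : Nat) => PySem.List.pyGetD xs (i : Int) 0)).sum := by
  induction fuel generalizing lo hi with
  | zero => rw [show hi - lo = 0 by omega]; simp [dsumB]
  | succ fuel ih =>
    rw [dsumB]
    by_cases h0 : hi - lo = 0
    · simp [h0]
    · by_cases h1 : hi - lo = 1
      · simp [h1, List.range'_succ]
      · simp only [h0, if_false, h1]
        rw [ih lo ((lo + hi) / 2) (by omega), ih ((lo + hi) / 2) hi (by omega)]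
        have hsplit : hi - lo = ((lo + hi) / 2 - lo) + (hi - (lo + hi) / 2) := by omega
        rw [hsplit, ← List.range'_append, show lo + 1 * ((lo + hi) / 2 - lo) = (lo + hi) / 2 by omega,
            List.map_append, List.sum_append]

theorem dprodB_eq (xs : List Int) (fuel lo hi : Nat) (h : hi - lo ≤ fuel) :
    dprodB xs fuel lo hi = ((List.range' lo (hi - lo)).map (fun (i : Nat) => PySem.List.pyGetD xs (i : Int) 0)).prod := by
  induction fuel generalizing lo hi with
  | zero => rw [show hi - lo = 0 by omega]; simp [dprodB]
  | succ fuel ih =>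
    rw [dprodB]
    by_cases h0 : hi - lo = 0
    · simp [h0]
    · by_cases h1 : hi - lo = 1
      · simp [h1, List.range'_succ]
      · simp only [h0, if_false, h1]
        rw [ih lo ((lo + hi) / 2) (by omega), ih ((lo + hi) / 2) hi (by omega)]
        have hsplit : hi - lo = ((lo + hi) / 2 - lo) + (hi - (lo + hi) / 2) := by omega
        rw [hsplit, ← List.range'_append, show lo + 1 * ((lo + hi) / 2 - lo) = (lo + hi) / 2 by omega,
            List.map_append, List.prod_append]

theorem map_pyGetD_range (xs : List Int) :
    (List.range xs.length).map (fun (i : Nat) => PySem.List.pyGetD xs (i : Int) 0) = xs := by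
  apply List.ext_getElem
  · simp
  · intro i h1 h2
    simp only [List.getElem_map, List.getElem_range, PySem.List.pyGetD_natCast]
    simp [List.getD_eq_getElem?_getD, List.getElem?_eq_getElem h2]

-- ===== VERDICT (by name: the statement is the Claim_ definition above) =====
theorem solution_spec : Claim_equal_solution := by
  intro num_list _
  unfold Spec_solution solution solution_alt
  rw [PySem.List.foldl_prod_mk
      (f := fun s i => s + PySem.List.pyGetD num_list i 0)
      (g := fun s i => if i < 10 then s * PySem.List.pyGetD num_list i 0 else s)]
  by_cases h : PySem.List.len num_list > 10
  · simp only [h, if_pos]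
    rw [PySem.List.foldl_pyRange_zero_pyGetD num_list 0 (fun s x => s + x) 0]
    rw [dsumB_eq num_list num_list.length 0 num_list.length (by omega)]
    simp only [Nat.sub_zero]
    rw [show List.range' 0 num_list.length = List.range num_list.length from List.range_eq_range'.symm]
    rw [map_pyGetD_range, List.sum_eq_foldl]
  · simp only [h, if_false]
    have hlen : num_list.length ≤ 10 := by
      simp [PySem.List.len] at h; exact_mod_cast h
    have hstep : ∀ m : Int, ∀ i ∈ PySem.List.pyRange 0 (PySem.List.len num_list) 1,
        (if i < 10 then m * PySem.List.pyGetD num_list i 0 else m)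
          = m * PySem.List.pyGetD num_list i 0 := by
      intro m i hi
      rw [PySem.List.mem_pyRange_one] at hi
      have : i < 10 := by
        have := hi.2
        simp [PySem.List.len] at this
        omega
      simp [this]
    rw [PySem.List.foldl_congr_mem' _ _ (fun m i => m * PySem.List.pyGetD num_list i 0) _
        (fun i hi m => hstep m i hi)]
    rw [PySem.List.foldl_pyRange_zero_pyGetD num_list 0 (fun s x => s * x) 1]
    rw [dprodB_eq num_list num_list.length 0 num_list.length (by omega)]
    simp only [Nat.sub_zero]
    rw [show List.range' 0 num_list.length = List.range num_list.length from List.range_eq_range'.symm]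
    rw [map_pyGetD_range, List.prod_eq_foldl]
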